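-- pv_equiv track=rewrite | github.com/Ahdmashreq/peopleM8 | employee/fast_formula.py | _convert_formula
-- ===== SOURCE A (Python) =====
-- def _convert_formula(str):
--     output = ''
--     for x in str:
--         if x == "+" or x == "-" or x == "*" or x == "/":
--             x = " {} ".format(x)
--         if x == "%":
--             x = "/100"
--         output += x
--     return output
-- ===== SOURCE B (Python) =====
-- def _convert_formula(str):
--     # single replace chain; '/' is padded before '%' -> '/100' so the inserted slash stays unpadded
--     return (str.replace('+', ' + ')
--                .replace('-', ' - ')
--                .replace('*', ' * ')
--                .replace('/', ' / ')
--                .replace('%', '/100'))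
-- ===== Notes on version B (the rewrite author's own statement) =====
-- stated objective: idiomatic
-- what changed: Replaced the explicit per-character loop with string accumulation by a chain of str.replace calls (padding '/' before rewriting '%' to '/100' so the inserted slash is untouched).
import Mathlib
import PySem

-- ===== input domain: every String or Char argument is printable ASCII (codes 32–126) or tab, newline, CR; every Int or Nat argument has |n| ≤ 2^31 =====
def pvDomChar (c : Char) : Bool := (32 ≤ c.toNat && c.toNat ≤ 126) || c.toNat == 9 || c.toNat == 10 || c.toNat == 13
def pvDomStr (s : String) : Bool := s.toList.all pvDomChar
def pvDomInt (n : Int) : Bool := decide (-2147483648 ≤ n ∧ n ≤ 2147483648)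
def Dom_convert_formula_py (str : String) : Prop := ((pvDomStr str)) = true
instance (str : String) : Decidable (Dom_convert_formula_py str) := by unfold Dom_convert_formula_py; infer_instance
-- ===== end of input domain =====

-- B replaces A's per-character accumulation loop by a chain of str.replace calls ('/' padded before '%'→'/100'); objective: idiomatic.

-- ===== PORT A =====
def convert_formula_py (str : String) : String :=
  String.ofList (str.toList.foldl (fun output x =>
    let x1 : List Char := if x = '+' || x = '-' || x = '*' || x = '/' then [' ', x, ' '] else [x]
    let x2 : List Char := if x1 = ['%'] then ['/', '1', '0', '0'] else x1
    output ++ x2) [])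

-- ===== PORT B =====
def convert_formula_py_alt (str : String) : String :=
  PySem.Str.replace
    (PySem.Str.replace
      (PySem.Str.replace
        (PySem.Str.replace
          (PySem.Str.replace str "+" " + ")
          "-" " - ")
        "*" " * ")
      "/" " / ")
    "%" "/100"

-- ===== PRECONDITION & SPEC =====
def Spec_convert_formula_py (str : String) (out : String) : Prop := out = convert_formula_py_alt str
instance (str : String) (out : String) : Decidable (Spec_convert_formula_py str out) := by unfold Spec_convert_formula_py; infer_instance

-- ===== CLAIM (what is proved, stated in full; the proofs are below) =====
def Claim_equal_convert_formula_py : Prop := ∀ (str : String), Dom_convert_formula_py str → Spec_convert_formula_py str (convert_formula_py str)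

-- ===== LEMMAS AND PROOFS =====

/-- the per-character substitution A performs -/
def pvSub (c : Char) : List Char :=
  if c = '+' || c = '-' || c = '*' || c = '/' then [' ', c, ' ']
  else if c = '%' then ['/', '1', '0', '0'] else [c]

/-- one single-character replace pass as a flatMap -/
def pvRep (o : Char) (new : List Char) (l : List Char) : List Char :=
  l.flatMap (fun c => if c = o then new else [c])

lemma go_single (o : Char) (new : List Char) :
    ∀ (l : List Char) (fuel : Nat) (acc : List Char), l.length ≤ fuel →
      PySem.Chars.replace.go [o] new fuel l acc = acc.reverse ++ pvRep o new l := by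
  intro l
  induction l with
  | nil =>
      intro fuel acc _
      cases fuel <;> simp [PySem.Chars.replace.go, pvRep]
  | cons c t ih =>
      intro fuel acc h
      cases fuel with
      | zero => simp at h
      | succ n =>
        simp only [List.length_cons, Nat.succ_le_succ_iff] at h
        by_cases hc : c = o
        · subst hc
          rw [show PySem.Chars.replace.go [c] new (n+1) (c :: t) acc =
              PySem.Chars.replace.go [c] new n (List.drop 1 (c :: t)) (new.reverse ++ acc) by
            simp [PySem.Chars.replace.go, List.isPrefixOf]]
          simp [ih n _ h, pvRep]
        · have hpre : List.isPrefixOf [o] (c :: t) = false := by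
            simp [List.isPrefixOf, Ne.symm hc]
          rw [show PySem.Chars.replace.go [o] new (n+1) (c :: t) acc =
              PySem.Chars.replace.go [o] new n t (c :: acc) by
            simp [PySem.Chars.replace.go, hpre]]
          simp [ih n _ h, pvRep, hc]

lemma replace_single (s : List Char) (o : Char) (new : List Char) :
    PySem.Chars.replace s [o] new = pvRep o new s := by
  rw [PySem.Chars.replace]
  simp [go_single o new s s.length [] (le_refl _)]

lemma chain_eq_sub (s : List Char) :
    pvRep '%' ['/', '1', '0', '0']
      (pvRep '/' [' ', '/', ' ']
        (pvRep '*' [' ', '*', ' ']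
          (pvRep '-' [' ', '-', ' ']
            (pvRep '+' [' ', '+', ' '] s)))) = s.flatMap pvSub := by
  induction s with
  | nil => rfl
  | cons c t ih =>
      have step : ∀ (o : Char) (new x y : List Char),
          pvRep o new (x ++ y) = pvRep o new x ++ pvRep o new y := by
        intro o new x y; simp [pvRep]
      have hcons : ∀ (o : Char) (new : List Char) (c : Char) (y : List Char),
          pvRep o new (c :: y) = pvRep o new [c] ++ pvRep o new y := by
        intro o new c y; simpa using step o new [c] y
      rw [hcons, step, step, step, step, ih, List.flatMap_cons]
      congr 1
      by_cases h1 : c = '+'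
      · subst h1; decide
      by_cases h2 : c = '-'
      · subst h2; decide
      by_cases h3 : c = '*'
      · subst h3; decide
      by_cases h4 : c = '/'
      · subst h4; decide
      by_cases h5 : c = '%'
      · subst h5; decide
      · simp [pvRep, pvSub, h1, h2, h3, h4, h5]

lemma foldA (s : List Char) (init : List Char) :
    s.foldl (fun output x =>
      let x1 : List Char := if x = '+' || x = '-' || x = '*' || x = '/' then [' ', x, ' '] else [x]
      let x2 : List Char := if x1 = ['%'] then ['/', '1', '0', '0'] else x1
      output ++ x2) init = init ++ s.flatMap pvSub := by
  induction s generalizing init with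
  | nil => simp
  | cons c t ih =>
      rw [List.foldl_cons, ih, List.flatMap_cons, ← List.append_assoc]
      congr 2
      by_cases h1 : c = '+'
      · subst h1; rfl
      by_cases h2 : c = '-'
      · subst h2; rfl
      by_cases h3 : c = '*'
      · subst h3; rfl
      by_cases h4 : c = '/'
      · subst h4; rfl
      by_cases h5 : c = '%'
      · subst h5; rfl
      · simp [pvSub, h1, h2, h3, h4, h5]

lemma alt_toList (str : String) :
    (convert_formula_py_alt str).toList = str.toList.flatMap pvSub := by
  simp only [convert_formula_py_alt, PySem.Str.toList_replace]
  rw [show ("+" : String).toList = ['+'] from rfl, show (" + " : String).toList = [' ', '+', ' '] from rfl,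
      show ("-" : String).toList = ['-'] from rfl, show (" - " : String).toList = [' ', '-', ' '] from rfl,
      show ("*" : String).toList = ['*'] from rfl, show (" * " : String).toList = [' ', '*', ' '] from rfl,
      show ("/" : String).toList = ['/'] from rfl, show (" / " : String).toList = [' ', '/', ' '] from rfl,
      show ("%" : String).toList = ['%'] from rfl, show ("/100" : String).toList = ['/', '1', '0', '0'] from rfl]
  rw [replace_single, replace_single, replace_single, replace_single, replace_single]
  exact chain_eq_sub _

-- ===== VERDICT (by name: the statement is the Claim_ definition above) =====
theorem convert_formula_py_spec : Claim_equal_convert_formula_py := by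
  intro str _
  show convert_formula_py str = convert_formula_py_alt str
  have h := alt_toList str
  rw [convert_formula_py, foldA, List.nil_append]
  rw [← String.toList_inj, String.toList_ofList, h]
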